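-- pv_equiv track=rewrite | github.com/ehddn5252/Algorithm | algorithmStudy/Week17/[효율성x]풍선터트리기.py | solution
-- ===== SOURCE A (Python) =====
-- def solution(a):
--     answer = 0
--     answer=len(a)
--     for index1,value1 in enumerate(a):
--         left_check=False
--         right_check=False
--         for index2,value2 in enumerate(a):
--             if index1>index2 and value1>value2:
--                 left_check=True
--             if index1<index2 and value1>value2:
--                 right_check=True
--             if left_check==True and right_check==True:
--                 answer-=1
--                 break
--     return answer
-- ===== SOURCE B (Python) =====
-- def solution(a):
--     # O(n): a balloon survives unless some strictly smaller value exists on both sides.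
--     suf = []
--     m = None
--     for v in reversed(a):
--         m = v if m is None else min(m, v)
--         suf.append(m)
--     suf.reverse()
--     alive = 0
--     left = None
--     for i, v in enumerate(a):
--         right = suf[i + 1] if i + 1 < len(a) else None
--         if not (left is not None and left < v and right is not None and right < v):
--             alive += 1
--         left = v if left is None else min(left, v)
--     return alive
-- ===== Notes on version B (the rewrite author's own statement) =====
-- stated objective: faster
-- what changed: Replaced the O(n^2) all-pairs double enumerate scan with a suffix-minimum array plus a running prefix minimum, counting survivors directly in two linear passes.
import Mathlib
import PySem

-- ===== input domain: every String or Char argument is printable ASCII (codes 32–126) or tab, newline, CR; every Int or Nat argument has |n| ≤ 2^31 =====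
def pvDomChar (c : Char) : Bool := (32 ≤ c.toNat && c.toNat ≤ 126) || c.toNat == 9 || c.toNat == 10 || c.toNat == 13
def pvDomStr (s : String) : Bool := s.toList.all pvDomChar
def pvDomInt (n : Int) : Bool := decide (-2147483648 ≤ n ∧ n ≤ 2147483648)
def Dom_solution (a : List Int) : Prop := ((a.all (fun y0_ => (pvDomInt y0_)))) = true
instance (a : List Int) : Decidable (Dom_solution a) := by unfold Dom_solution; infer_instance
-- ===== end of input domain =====

-- B replaces A's quadratic all-pairs scan by prefix/suffix minima in single passes (asymptotically faster).

-- ===== PORT A =====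
-- inner 'for index2,value2 in enumerate(a)' loop with the two flags and the break;
-- returns true iff the loop hit 'answer -= 1; break'
def aInner : List (Int × Int) → Int → Int → Bool → Bool → Bool
  | [], _, _, _, _ => false
  | p :: rest, i, v, l, r =>
    let l' := if decide (i > p.1) && decide (v > p.2) then true else l
    let r' := if decide (i < p.1) && decide (v > p.2) then true else r
    if l' && r' then true else aInner rest i v l' r'

def solution (a : List Int) : Int :=
  (PySem.List.enumerate a).foldl
    (fun acc p => if aInner (PySem.List.enumerate a) p.1 p.2 false false then acc - 1 else acc)
    (a.length : Int)

-- ===== PORT B =====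
-- suffix minima built over reversed(a), then reversed back (Source B's first loop)
def bSuf (a : List Int) : List Int :=
  (a.reverse.foldl
    (fun (acc : List Int × Option Int) v =>
      let m := match acc.2 with | none => v | some m0 => min m0 v
      (acc.1 ++ [m], some m))
    ([], none)).1.reverse

def solution_alt (a : List Int) : Int :=
  let suf := bSuf a
  ((PySem.List.enumerate a).foldl
    (fun (st : Int × Option Int) p =>
      let right : Option Int :=
        if p.1 + 1 < (a.length : Int) then some (PySem.List.pyGetD suf (p.1 + 1) 0) else none
      let alive :=
        if (match st.2 with | some l => decide (l < p.2) | none => false) &&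
           (match right with | some r => decide (r < p.2) | none => false)
        then st.1 else st.1 + 1
      let left : Option Int := match st.2 with | none => some p.2 | some l => some (min l p.2)
      (alive, left))
    (0, none)).1

-- ===== PRECONDITION & SPEC =====
def Spec_solution (a : List Int) (out : Int) : Prop := out = solution_alt a
instance (a : List Int) (out : Int) : Decidable (Spec_solution a out) := by unfold Spec_solution; infer_instance

-- ===== CLAIM (what is proved, stated in full; the proofs are below) =====
def Claim_equal_solution : Prop := ∀ (a : List Int), Dom_solution a → Spec_solution a (solution a)

-- ===== LEMMAS AND PROOFS =====

-- min of a list as an Option (none for [])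
def minO : List Int → Option Int
  | [] => none
  | x :: xs => some (xs.foldl min x)

def optLt : Option Int → Int → Bool
  | none, _ => false
  | some l, v => decide (l < v)

def optMin : Option Int → Int → Option Int
  | none, v => some v
  | some l, v => some (min l v)

-- counts of popped / surviving balloons, structural recursion carrying the prefix min
def popCnt : Option Int → List Int → Int
  | _, [] => 0
  | left, v :: rest => (if optLt left v && optLt (minO rest) v then 1 else 0) + popCnt (optMin left v) rest

def alvCnt : Option Int → List Int → Int
  | _, [] => 0
  | left, v :: rest => (if optLt left v && optLt (minO rest) v then 0 else 1) + alvCnt (optMin left v) rest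

-- structural version of B's suffix-min list
def sufM : List Int → List Int
  | [] => []
  | x :: xs => match sufM xs with
    | [] => [x]
    | m :: ms => min x m :: m :: ms

theorem foldl_min_assoc (ys : List Int) : ∀ (x y : Int), List.foldl min (min x y) ys = min x (List.foldl min y ys) := by
  induction ys with
  | nil => intro x y; rfl
  | cons z zs ih =>
    intro x y
    rw [List.foldl_cons, List.foldl_cons, min_assoc, ih]

theorem foldl_min_cons (ys : List Int) (x y : Int) :
    List.foldl min x (y :: ys) = min x (List.foldl min y ys) := by
  rw [List.foldl_cons, foldl_min_assoc]

theorem foldl_min_lt_iff (xs : List Int) : ∀ (x v : Int),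
    List.foldl min x xs < v ↔ (x < v ∨ xs.any (fun y => decide (y < v)) = true) := by
  induction xs with
  | nil => intro x v; simp
  | cons y ys ih =>
    intro x v
    rw [List.foldl_cons, ih (min x y) v]
    simp [or_assoc]

theorem any_lt_eq_optLt (pre : List Int) (v : Int) :
    pre.any (fun y => decide (y < v)) = optLt (minO pre) v := by
  cases pre with
  | nil => simp [minO, optLt]
  | cons x xs =>
    simp only [minO, optLt, List.any_cons]
    rw [Bool.eq_iff_iff]
    simp only [Bool.or_eq_true, decide_eq_true_eq, foldl_min_lt_iff]

theorem minO_append (pre : List Int) (v : Int) : minO (pre ++ [v]) = optMin (minO pre) v := by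
  cases pre with
  | nil => simp [minO, optMin]
  | cons x xs => simp [minO, optMin, List.foldl_append]

theorem sufM_ne_nil (x : Int) (xs : List Int) : sufM (x :: xs) ≠ [] := by
  simp only [sufM]; cases sufM xs <;> simp

theorem sufM_length (xs : List Int) : (sufM xs).length = xs.length := by
  induction xs with
  | nil => rfl
  | cons x xs ih => simp only [sufM]; cases h : sufM xs <;> simp_all

theorem sufM_head? (xs : List Int) : (sufM xs).head? = minO xs := by
  induction xs with
  | nil => rfl
  | cons x xs ih =>
    simp only [sufM]
    cases h : sufM xs with
    | nil =>
      have : xs = [] := by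
        have := sufM_length xs; rw [h] at this; exact List.eq_nil_of_length_eq_zero this.symm
      subst this; simp [minO]
    | cons m ms =>
      rw [h] at ih
      cases xs with
      | nil => simp [sufM] at h
      | cons y ys =>
        simp only [List.head?] at ih
        simp only [List.head?, minO, Option.some.injEq] at *
        rw [foldl_min_cons, ← ih]

theorem sufM_tail (x : Int) (xs : List Int) : (sufM (x :: xs)).tail = sufM xs := by
  simp only [sufM]
  cases h : sufM xs with
  | nil => simp
  | cons m ms => simp

theorem get?_sufM (xs : List Int) : ∀ (k : Nat), (sufM xs)[k]? = minO (xs.drop k) := by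
  induction xs with
  | nil => intro k; simp [sufM, minO]
  | cons x xs ih =>
    intro k
    cases k with
    | zero =>
      rw [← List.head?_eq_getElem?, sufM_head?]
      rfl
    | succ n =>
      have h1 : (sufM (x :: xs))[n + 1]? = (sufM (x :: xs)).tail[n]? := by
        cases h : sufM (x :: xs) with
        | nil => exact absurd h (sufM_ne_nil x xs)
        | cons m ms => simp
      rw [h1, sufM_tail, ih]
      rfl

-- B's first loop builds exactly sufM
theorem bSuf_fold (xs : List Int) :
    xs.reverse.foldl
      (fun (acc : List Int × Option Int) v =>
        let m := match acc.2 with | none => v | some m0 => min m0 v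
        (acc.1 ++ [m], some m))
      ([], none) = ((sufM xs).reverse, (sufM xs).head?) := by
  induction xs with
  | nil => rfl
  | cons x xs ih =>
    rw [List.reverse_cons, List.foldl_append, ih]
    simp only [List.foldl_cons, List.foldl_nil, sufM_head?]
    simp only [sufM]
    cases h : sufM xs with
    | nil =>
      have : xs = [] := by
        have := sufM_length xs; rw [h] at this; exact List.eq_nil_of_length_eq_zero this.symm
      subst this; simp [minO]
    | cons m ms =>
      cases xs with
      | nil => simp [sufM] at h
      | cons y ys =>
        have hm : m = List.foldl min y ys := by
          have := sufM_head? (y :: ys); rw [h] at this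
          simpa [minO] using this
        simp [minO, hm, foldl_min_cons ys x y, min_comm (List.foldl min y ys) x]

theorem bSuf_eq_sufM (xs : List Int) : bSuf xs = sufM xs := by
  unfold bSuf
  rw [bSuf_fold]
  simp

-- aInner with its monotone flags is the pair of existence tests
theorem aInner_eq (xs : List (Int × Int)) : ∀ (i v : Int) (l r : Bool), (l && r) = false →
    aInner xs i v l r =
      ((l || xs.any (fun p => decide (p.1 < i) && decide (p.2 < v))) &&
       (r || xs.any (fun p => decide (i < p.1) && decide (p.2 < v)))) := by
  induction xs with
  | nil =>
    intro i v l r h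
    simp only [aInner, List.any_nil, Bool.or_false]
    exact h.symm
  | cons p rest ih =>
    intro i v l r h
    simp only [aInner, List.any_cons, gt_iff_lt]
    generalize hAL : (rest.any fun q => decide (q.1 < i) && decide (q.2 < v)) = AL
    generalize hAR : (rest.any fun q => decide (i < q.1) && decide (q.2 < v)) = AR
    by_cases hc : ((if decide (p.1 < i) && decide (p.2 < v) then true else l) &&
        (if decide (i < p.1) && decide (p.2 < v) then true else r)) = true
    · rw [if_pos hc]
      clear hAL hAR
      revert h hc
      generalize decide (p.1 < i) = c1
      generalize decide (p.2 < v) = c2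
      generalize decide (i < p.1) = c3
      revert l r AL AR c1 c2 c3
      decide
    · have hc' := Bool.eq_false_iff.mpr hc
      rw [if_neg hc, ih i v _ _ hc', hAL, hAR]
      clear hAL hAR hc
      revert h hc'
      generalize decide (p.1 < i) = c1
      generalize decide (p.2 < v) = c2
      generalize decide (i < p.1) = c3
      revert l r AL AR c1 c2 c3
      decide

-- indices of 'enumerate xs s' are all ≥ s: the left-test over that part is false
theorem enum_any_left_false (xs : List Int) : ∀ (s i v : Int), i ≤ s →
    (PySem.List.enumerate xs s).any (fun p => decide (p.1 < i) && decide (p.2 < v)) = false := by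
  induction xs with
  | nil => intro s i v _; simp [PySem.List.enumerate]
  | cons x xs ih =>
    intro s i v h
    rw [PySem.List.enumerate_cons]
    simp only [List.any_cons, ih (s + 1) i v (by omega)]
    have : ¬ ((s : Int) < i) := by omega
    simp [this]

-- the right-test over 'enumerate xs s' with threshold i < s is just an any over the values
theorem enum_any_right_all (xs : List Int) : ∀ (s i v : Int), i < s →
    (PySem.List.enumerate xs s).any (fun p => decide (i < p.1) && decide (p.2 < v)) =
      xs.any (fun y => decide (y < v)) := by
  induction xs with
  | nil => intro s i v _; simp [PySem.List.enumerate]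
  | cons x xs ih =>
    intro s i v h
    rw [PySem.List.enumerate_cons]
    simp only [List.any_cons, ih (s + 1) i v (by omega)]
    have : (i < s) := h
    simp [this]

theorem enum_any_left (xs : List Int) (ys : List Int) (v : Int) : ∀ (s : Int),
    (PySem.List.enumerate (xs ++ ys) s).any
      (fun p => decide (p.1 < s + xs.length) && decide (p.2 < v)) =
      xs.any (fun y => decide (y < v)) := by
  induction xs with
  | nil =>
    intro s
    simp only [List.nil_append, List.any_nil, List.length_nil, Nat.cast_zero, add_zero]
    exact enum_any_left_false ys s s v le_rfl
  | cons x xs ih =>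
    intro s
    rw [List.cons_append, PySem.List.enumerate_cons]
    simp only [List.any_cons]
    have h1 : (s : Int) < s + (x :: xs).length := by simp
    have h2 := ih (s + 1)
    simp only [List.length_cons] at *
    have harith : s + 1 + (xs.length : Int) = s + ((xs.length : Int) + 1) := by ring
    rw [harith] at h2
    push_cast at *
    simp [h1, h2]

theorem enum_any_right (xs : List Int) (rest : List Int) (x v : Int) : ∀ (s : Int),
    (PySem.List.enumerate (xs ++ x :: rest) s).any
      (fun p => decide ((s + xs.length : Int) < p.1) && decide (p.2 < v)) =
      rest.any (fun y => decide (y < v)) := by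
  induction xs with
  | nil =>
    intro s
    rw [List.nil_append, PySem.List.enumerate_cons]
    simp only [List.any_cons]
    have h1 : ¬ ((s + ([] : List Int).length : Int) < s) := by simp
    have h2 := enum_any_right_all rest (s + 1) (s + ([] : List Int).length) v (by simp)
    simp only [List.length_nil, Nat.cast_zero, add_zero] at *
    simp [h2]
  | cons y ys ih =>
    intro s
    rw [List.cons_append, PySem.List.enumerate_cons]
    simp only [List.any_cons]
    have h1 : ¬ ((s + (y :: ys).length : Int) < s) := by simp; omega
    have h2 := ih (s + 1)
    simp only [List.length_cons] at *
    have harith : s + 1 + (ys.length : Int) = s + ((ys.length : Int) + 1) := by ring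
    rw [harith] at h2
    push_cast at *
    simp [h1, h2]

-- A's outer loop, generalized over the processed prefix
theorem A_fold (xs : List Int) : ∀ (pre : List Int) (init : Int),
    (PySem.List.enumerate xs (pre.length : Int)).foldl
      (fun acc p =>
        if aInner (PySem.List.enumerate (pre ++ xs)) p.1 p.2 false false then acc - 1 else acc)
      init = init - popCnt (minO pre) xs := by
  induction xs with
  | nil => intro pre init; simp [PySem.List.enumerate, popCnt]
  | cons v rest ih =>
    intro pre init
    rw [PySem.List.enumerate_cons, List.foldl_cons]
    have hcond : aInner (PySem.List.enumerate (pre ++ v :: rest)) (pre.length : Int) v false false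
        = (optLt (minO pre) v && optLt (minO rest) v) := by
      rw [aInner_eq _ _ _ _ _ rfl]
      have hl := enum_any_left pre (v :: rest) v 0
      have hr := enum_any_right pre rest v v 0
      simp only [zero_add] at hl hr
      rw [hl, hr, any_lt_eq_optLt, any_lt_eq_optLt]
      simp
    have hsplit : pre ++ v :: rest = (pre ++ [v]) ++ rest := by simp
    have hlen : ((pre ++ [v]).length : Int) = (pre.length : Int) + 1 := by simp
    have ihv := ih (pre ++ [v]) (if aInner (PySem.List.enumerate (pre ++ v :: rest)) (pre.length : Int) v false false then init - 1 else init)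
    rw [hlen, ← hsplit, minO_append] at ihv
    rw [ihv, hcond]
    simp only [popCnt]
    split_ifs <;> ring

-- B's main loop, generalized over the processed prefix
theorem B_fold (a : List Int) : ∀ (xs pre : List Int), a = pre ++ xs → ∀ (acc : Int),
    ((PySem.List.enumerate xs (pre.length : Int)).foldl
      (fun (st : Int × Option Int) p =>
        let right : Option Int :=
          if p.1 + 1 < (a.length : Int) then some (PySem.List.pyGetD (sufM a) (p.1 + 1) 0) else none
        let alive :=
          if (match st.2 with | some l => decide (l < p.2) | none => false) &&
             (match right with | some r => decide (r < p.2) | none => false)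
          then st.1 else st.1 + 1
        let left : Option Int := match st.2 with | none => some p.2 | some l => some (min l p.2)
        (alive, left))
      (acc, minO pre)).1 = acc + alvCnt (minO pre) xs := by
  intro xs
  induction xs with
  | nil => intro pre _ acc; simp [PySem.List.enumerate, alvCnt]
  | cons v rest ih =>
    intro pre ha acc
    rw [PySem.List.enumerate_cons, List.foldl_cons]
    have hlen : ((pre ++ [v]).length : Int) = (pre.length : Int) + 1 := by simp
    -- the 'right' value at this index
    have hright : (if (pre.length : Int) + 1 < (a.length : Int)
          then some (PySem.List.pyGetD (sufM a) ((pre.length : Int) + 1) 0) else none)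
        = minO rest := by
      subst ha
      cases rest with
      | nil =>
        simp [minO]
      | cons w ws =>
        have hin : (pre.length : Int) + 1 < ((pre ++ v :: w :: ws).length : Int) := by
          simp only [List.length_append, List.length_cons]
          push_cast
          omega
        rw [if_pos hin]
        have hcast : (pre.length : Int) + 1 = ((pre.length + 1 : Nat) : Int) := by push_cast; ring
        rw [hcast, PySem.List.pyGetD_natCast]
        have hget : (sufM (pre ++ v :: w :: ws))[pre.length + 1]? = minO (w :: ws) := by
          rw [get?_sufM]
          congr 1
          have : pre ++ v :: w :: ws = (pre ++ [v]) ++ w :: ws := by simp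
          rw [this]
          have hl : pre.length + 1 = (pre ++ [v]).length := by simp
          rw [hl, List.drop_left]
        simp only [minO] at hget ⊢
        simp [List.getD, hget]
    have hcondL : (match minO pre with | some l => decide (l < v) | none => false) = optLt (minO pre) v := by
      cases minO pre <;> rfl
    have hcondR : (match minO rest with | some r => decide (r < v) | none => false) = optLt (minO rest) v := by
      cases minO rest <;> rfl
    have hleft : (match minO pre with | none => some v | some l => some (min l v)) = optMin (minO pre) v := by
      cases minO pre <;> rfl
    have ihv := ih (pre ++ [v]) (by rw [ha]; simp)
    rw [hlen, minO_append] at ihv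
    simp only
    rw [hright, hcondL, hcondR, hleft]
    rw [ihv]
    simp only [alvCnt]
    split_ifs <;> ring

theorem pop_add_alv (xs : List Int) : ∀ (left : Option Int),
    popCnt left xs + alvCnt left xs = (xs.length : Int) := by
  induction xs with
  | nil => intro left; simp [popCnt, alvCnt]
  | cons v rest ih =>
    intro left
    simp only [popCnt, alvCnt, List.length_cons]
    have := ih (optMin left v)
    split_ifs <;> push_cast <;> omega

-- ===== VERDICT (by name: the statement is the Claim_ definition above) =====
theorem solution_spec : Claim_equal_solution := by
  intro a _
  unfold Spec_solution
  have hA := A_fold a [] (a.length : Int)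
  have hB := B_fold a a [] rfl 0
  simp only [List.length_nil, Nat.cast_zero, List.nil_append, minO, zero_add] at hA hB
  have e1 : solution a = (a.length : Int) - popCnt none a := hA
  have e2 : solution_alt a = alvCnt none a := by
    unfold solution_alt
    rw [bSuf_eq_sufM]
    exact hB
  rw [e1, e2]
  linarith [pop_add_alv a none]
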